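-- pv_equiv track=rewrite | github.com/codewithsneha001/Jala-Assignment | python/4.Arrays1/LargeSmallDiff.py | difference_largest_smallest
-- ===== SOURCE A (Python) =====
-- def difference_largest_smallest(arr):
--     min_val = max_val = arr[0]
--     for num in arr:
--         if num < min_val:
--             min_val = num
--         if num > max_val:
--             max_val = num
--     return max_val - min_val
-- ===== SOURCE B (Python) =====
-- def difference_largest_smallest(arr):
--     s = sorted(arr)
--     return s[-1] - s[0]
-- ===== Notes on version B (the rewrite author's own statement) =====
-- stated objective: idiomatic
-- what changed: replaces the manual running min/max scan with sort-then-read-extremes (sorted copy, last minus first element)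
import Mathlib
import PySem

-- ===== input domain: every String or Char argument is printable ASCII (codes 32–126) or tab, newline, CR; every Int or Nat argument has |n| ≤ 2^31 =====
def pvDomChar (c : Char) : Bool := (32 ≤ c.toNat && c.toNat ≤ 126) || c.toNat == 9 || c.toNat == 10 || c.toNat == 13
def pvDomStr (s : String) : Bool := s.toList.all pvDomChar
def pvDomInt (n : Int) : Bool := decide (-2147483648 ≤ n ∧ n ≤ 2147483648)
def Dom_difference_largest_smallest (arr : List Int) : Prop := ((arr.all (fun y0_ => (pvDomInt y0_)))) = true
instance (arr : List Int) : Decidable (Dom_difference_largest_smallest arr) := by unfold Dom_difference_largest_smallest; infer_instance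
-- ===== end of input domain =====

-- B sorts a copy and returns last minus first, instead of A's running min/max scan (objective: idiomatic).

-- ===== PORT A =====
-- min_val = max_val = arr[0]; then one pass updating both; arr[0] on [] raises (excluded by Pre_).
def difference_largest_smallest (arr : List Int) : Int :=
  let a := PySem.List.pyGetD arr 0 0
  let p := arr.foldl
    (fun (p : Int × Int) num =>
      (if num < p.1 then num else p.1, if num > p.2 then num else p.2)) (a, a)
  p.2 - p.1

-- ===== PORT B =====
-- s = sorted(arr); return s[-1] - s[0]; s[-1] on [] raises (excluded by Pre_).
def difference_largest_smallest_alt (arr : List Int) : Int :=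
  let s := PySem.List.sorted arr (fun x => x) false
  PySem.List.pyGetD s (-1) 0 - PySem.List.pyGetD s 0 0

-- ===== PRECONDITION & SPEC =====
-- Pre_ excludes only the empty list, on which A raises IndexError (arr[0]) and B raises IndexError (s[-1]).
def Pre_difference_largest_smallest (arr : List Int) : Prop := arr ≠ []
instance (arr : List Int) : Decidable (Pre_difference_largest_smallest arr) := by
  unfold Pre_difference_largest_smallest; infer_instance
def pvWitness_difference_largest_smallest : List Int := ([3, -1, 4])

def Spec_difference_largest_smallest (arr : List Int) (out : Int) : Prop := out = difference_largest_smallest_alt arr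
instance (arr : List Int) (out : Int) : Decidable (Spec_difference_largest_smallest arr out) := by unfold Spec_difference_largest_smallest; infer_instance

-- ===== CLAIM (what is proved, stated in full; the proofs are below) =====
def Claim_equal_difference_largest_smallest : Prop := ∀ (arr : List Int), Dom_difference_largest_smallest arr → Pre_difference_largest_smallest arr → Spec_difference_largest_smallest arr (difference_largest_smallest arr)

-- ===== LEMMAS AND PROOFS =====

-- A's fold updates both components exactly like min/max.
theorem foldA_eq_min_max (xs : List Int) (a b : Int) :
    xs.foldl
      (fun (p : Int × Int) num =>
        (if num < p.1 then num else p.1, if num > p.2 then num else p.2)) (a, b)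
      = (xs.foldl min a, xs.foldl max b) := by
  induction xs generalizing a b with
  | nil => rfl
  | cons x xs ih =>
      simp only [List.foldl_cons]
      rw [show (if x < a then x else a) = min a x from by rw [min_def]; split_ifs <;> omega,
          show (if x > b then x else b) = max b x from by rw [max_def]; split_ifs <;> omega, ih]

theorem foldl_min_mem (xs : List Int) (a : Int) : xs.foldl min a ∈ a :: xs := by
  induction xs generalizing a with
  | nil => simp
  | cons x xs ih =>
      simp only [List.foldl_cons]
      rcases List.mem_cons.mp (ih (min a x)) with h | h
      · rw [h]; rcases min_choice a x with hc | hc <;> rw [hc] <;> simp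
      · exact List.mem_cons_of_mem _ (List.mem_cons_of_mem _ h)

theorem foldl_min_le (xs : List Int) (a : Int) : ∀ y ∈ a :: xs, xs.foldl min a ≤ y := by
  induction xs generalizing a with
  | nil => simp
  | cons x xs ih =>
      intro y hy
      have h1 := ih (min a x)
      rcases List.mem_cons.mp hy with h | h
      · subst h
        exact le_trans (h1 _ (List.mem_cons_self)) (min_le_left _ _)
      · rcases List.mem_cons.mp h with h | h
        · subst h
          exact le_trans (h1 _ (List.mem_cons_self)) (min_le_right _ _)
        · exact h1 _ (List.mem_cons_of_mem _ h)

theorem foldl_max_mem (xs : List Int) (a : Int) : xs.foldl max a ∈ a :: xs := by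
  induction xs generalizing a with
  | nil => simp
  | cons x xs ih =>
      simp only [List.foldl_cons]
      rcases List.mem_cons.mp (ih (max a x)) with h | h
      · rw [h]; rcases max_choice a x with hc | hc <;> rw [hc] <;> simp
      · exact List.mem_cons_of_mem _ (List.mem_cons_of_mem _ h)

theorem foldl_le_max (xs : List Int) (a : Int) : ∀ y ∈ a :: xs, y ≤ xs.foldl max a := by
  induction xs generalizing a with
  | nil => simp
  | cons x xs ih =>
      intro y hy
      have h1 := ih (max a x)
      rcases List.mem_cons.mp hy with h | h
      · subst h
        exact le_trans (le_max_left _ _) (h1 _ (List.mem_cons_self))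
      · rcases List.mem_cons.mp h with h | h
        · subst h
          exact le_trans (le_max_right _ _) (h1 _ (List.mem_cons_self))
        · exact h1 _ (List.mem_cons_of_mem _ h)

-- In a ≤-sorted list every element is ≤ the last one.
theorem pairwise_le_getLast (l : List Int) (h : l.Pairwise (· ≤ ·)) (hne : l ≠ []) :
    ∀ y ∈ l, y ≤ l.getLast hne := by
  induction l with
  | nil => simp at hne
  | cons a t ih =>
      intro y hy
      cases t with
      | nil => simp at hy; simp [hy]
      | cons b u =>
          have htne : (b :: u) ≠ [] := by simp
          have hpt : (b :: u).Pairwise (· ≤ ·) := (List.pairwise_cons.mp h).2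
          have ha : ∀ z ∈ b :: u, a ≤ z := (List.pairwise_cons.mp h).1
          rw [List.getLast_cons htne]
          rcases List.mem_cons.mp hy with rfl | hy
          · exact le_trans (ha _ (List.getLast_mem htne)) (le_refl _)
          · exact ih hpt htne y hy

-- head of sorted = fold-min, last of sorted = fold-max (for arr = x :: xs).
theorem main_eq (x : Int) (xs : List Int) :
    difference_largest_smallest (x :: xs) = difference_largest_smallest_alt (x :: xs) := by
  unfold difference_largest_smallest difference_largest_smallest_alt
  simp only [PySem.List.pyGetD_zero_cons, List.foldl_cons, foldA_eq_min_max, ]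
  set s := PySem.List.sorted (x :: xs) (fun x => x) false with hs
  have hperm : s.Perm (x :: xs) := PySem.List.sorted_perm _ _ _
  have hsne : s ≠ [] := by
    intro h; have := hperm.length_eq; simp [h] at this
  have hpw : s.Pairwise (fun a b => a ≤ b) := PySem.List.sorted_pairwise (x :: xs) (fun x => x)
  obtain ⟨m, t, hst⟩ := List.exists_cons_of_ne_nil hsne
  -- B's two indexings
  have hlast : PySem.List.pyGetD s (-1) 0 = s.getLast hsne := PySem.List.pyGetD_neg_one s 0 hsne
  have hzero : PySem.List.pyGetD s 0 0 = m := by rw [hst]; exact PySem.List.pyGetD_zero_cons m t 0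
  rw [hlast, hzero]
  have hmem_s : ∀ y, y ∈ s ↔ y ∈ x :: xs := fun y => hperm.mem_iff
  have hhead : ∀ y ∈ x :: xs, m ≤ y :=
    PySem.List.key_head_sorted_le (x :: xs) (fun x => x) (hs.symm.trans hst)
  have hmin : m = xs.foldl min x := by
    apply le_antisymm
    · exact hhead _ (foldl_min_mem xs x)
    · exact foldl_min_le xs x m ((hmem_s m).mp (hst ▸ List.mem_cons_self))
  have hmax : s.getLast hsne = xs.foldl max x := by
    apply le_antisymm
    · exact foldl_le_max xs x _ ((hmem_s _).mp (List.getLast_mem hsne))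
    · exact pairwise_le_getLast s hpw hsne _ ((hmem_s _).mpr (foldl_max_mem xs x))
  rw [hmin, hmax]
  simp

-- ===== VERDICT (by name: the statement is the Claim_ definition above) =====
theorem difference_largest_smallest_spec : Claim_equal_difference_largest_smallest := by
  intro arr _ hpre
  unfold Spec_difference_largest_smallest
  obtain ⟨x, xs, rfl⟩ := List.exists_cons_of_ne_nil hpre
  exact main_eq x xs
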